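-- pv_equiv track=rewrite | github.com/RealTimeWeb/datasets | builder/languages/build_java.py | parse_json_path
-- ===== SOURCE A (Python) =====
-- def parse_json_path(path, result="json_data"):
--     elements = []
--     for keys in path.split("."):
--         while keys:
--             left, sep, keys = keys.partition("[")
--             val, sep, keys = keys.partition("]")
--             if left:
--                 elements.append('"{}"'.format(left))
--             if val:
--                 elements.append(int(val))
--     if elements:
--         for item in elements[:-1]:
--             if isinstance(item, str):
--                 result = '((JSONObject) {}.get({}))'.format(result, item)
--             else:
--                 result = '((JSONArray) {}.get({}))'.format(result, item)
--         result = '{}.get({})'.format(result, elements[-1])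
--     return result
-- ===== SOURCE B (Python) =====
-- def _build(elements, result):
--     if not elements:
--         return result
--     head, rest = elements[0], elements[1:]
--     if not rest:
--         return '{}.get({})'.format(result, head)
--     if isinstance(head, str):
--         return _build(rest, '((JSONObject) {}.get({}))'.format(result, head))
--     return _build(rest, '((JSONArray) {}.get({}))'.format(result, head))
--
--
-- def parse_json_path(path, result="json_data"):
--     elements = []
--     buf = []
--     in_br = False
--     for ch in path:
--         if in_br:
--             if ch == ']':
--                 if buf:
--                     elements.append(int(''.join(buf)))
--                 buf = []
--                 in_br = False
--             else:
--                 buf.append(ch)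
--         elif ch == '[':
--             if buf:
--                 elements.append('"{}"'.format(''.join(buf)))
--             buf = []
--             in_br = True
--         elif ch == '.':
--             if buf:
--                 elements.append('"{}"'.format(''.join(buf)))
--             buf = []
--         else:
--             buf.append(ch)
--     if buf:
--         if in_br:
--             elements.append(int(''.join(buf)))
--         else:
--             elements.append('"{}"'.format(''.join(buf)))
--     return _build(elements, result)
-- ===== Notes on version B (the rewrite author's own statement) =====
-- stated objective: alternative
-- what changed: B tokenizes the whole path in one character-level state-machine scan (key mode / bracket mode, a bracket ending only at ']') instead of A's dot-split plus a nested while loop of two partition() calls per segment, and builds the accessor string by structural recursion on the element list instead of A's slice elements[:-1] fold plus elements[-1]; …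
import Mathlib
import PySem

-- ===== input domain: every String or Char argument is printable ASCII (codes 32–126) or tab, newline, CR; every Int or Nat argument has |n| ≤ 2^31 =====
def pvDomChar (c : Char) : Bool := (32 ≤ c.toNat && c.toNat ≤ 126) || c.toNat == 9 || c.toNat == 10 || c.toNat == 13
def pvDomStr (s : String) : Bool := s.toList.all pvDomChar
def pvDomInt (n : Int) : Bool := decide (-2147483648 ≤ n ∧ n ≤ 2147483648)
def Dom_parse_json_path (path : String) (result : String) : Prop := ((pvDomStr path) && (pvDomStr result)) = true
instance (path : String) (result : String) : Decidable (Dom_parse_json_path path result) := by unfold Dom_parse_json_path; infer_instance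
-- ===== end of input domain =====

-- B replaces A's dot-split + nested while/partition tokenizer by a single char-level
-- state-machine scan over the whole path, and A's slice-and-fold build by a recursive build
-- (objective: alternative; same outputs, same cost, on well-formed paths stated in Pre_).

-- ===== PORT A =====
-- an element of the Python `elements` list: either an already-quoted key string or an index
inductive PvElem
  | s : String → PvElem
  | i : Int → PvElem
deriving DecidableEq, Repr

-- Python's keys.partition(c) for a single-char separator, keeping only (before, after):
-- if c is absent, before = whole string and after = "" — exactly Python's partition triple
-- collapsed (the sep component is only used by A to rebind `keys`, which `after` captures).
def pvPart1 (c : Char) : List Char → List Char × List Char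
  | [] => ([], [])
  | x :: xs => if x = c then ([], xs) else
      let p := pvPart1 c xs
      (x :: p.1, p.2)

theorem pvPart1_len2_le (c : Char) (xs : List Char) : (pvPart1 c xs).2.length ≤ xs.length := by
  induction xs with
  | nil => simp [pvPart1]
  | cons x xs ih =>
    simp only [pvPart1]
    split
    · simp
    · simpa using Nat.le_succ_of_le ih

theorem pvPart1_len2_lt (c : Char) (xs : List Char) (h : (pvPart1 c xs).2 ≠ []) :
    (pvPart1 c xs).2.length < xs.length := by
  induction xs with
  | nil => simp [pvPart1] at h
  | cons x xs ih =>
    simp only [pvPart1] at h ⊢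
    split
    · simpa using Nat.lt_succ_of_le (pvPart1_len2_le c xs)
    · rename_i hx
      simp only [hx, if_neg] at h
      exact Nat.lt_succ_of_lt (ih (by simpa using h))

theorem pvPart1_chain_lt (c c' : Char) (keys : List Char) (h : keys ≠ []) :
    (pvPart1 c' (pvPart1 c keys).2).2.length < keys.length := by
  by_cases h1 : (pvPart1 c keys).2 = []
  · simp [h1, pvPart1]
    exact List.length_pos_iff.mpr h
  · calc (pvPart1 c' (pvPart1 c keys).2).2.length
        ≤ (pvPart1 c keys).2.length := pvPart1_len2_le _ _
      _ < keys.length := pvPart1_len2_lt _ _ h1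

-- A's inner `while keys:` loop over one dot-separated segment
def pvAWhile (keys : List Char) (acc : List PvElem) : List PvElem :=
  if hk : keys = [] then acc
  else
    let p1 := pvPart1 '[' keys          -- left, _, keys = keys.partition("[")
    let p2 := pvPart1 ']' p1.2          -- val, _, keys = keys.partition("]")
    let acc1 := if p1.1 ≠ [] then acc ++ [PvElem.s ("\"" ++ String.mk p1.1 ++ "\"")] else acc
    let acc2 := if p2.1 ≠ [] then acc1 ++ [PvElem.i ((PySem.Int.ofChars? p2.1).getD 0)] else acc1
    pvAWhile p2.2 acc2
termination_by keys.length
decreasing_by exact pvPart1_chain_lt '[' ']' keys hk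

-- str item → the quoted string itself, int item → str(n)
def pvFmt : PvElem → String
  | .s q => q
  | .i n => PySem.Int.toStr n

def parse_json_path (path : String) (result : String) : String :=
  let elements := (PySem.Chars.splitOn path.toList ['.']).foldl (fun a seg => pvAWhile seg a) []
  if h : elements = [] then result
  else
    let r := elements.dropLast.foldl (fun r item =>
      match item with
      | PvElem.s q => "((JSONObject) " ++ r ++ ".get(" ++ q ++ "))"
      | PvElem.i n => "((JSONArray) " ++ r ++ ".get(" ++ PySem.Int.toStr n ++ "))") result
    r ++ ".get(" ++ pvFmt (elements.getLast h) ++ ")"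

-- ===== PORT B =====
-- flush a pending key buffer (as a quoted element) / a pending bracket-content buffer (as int)
def pvFlushKey (buf : List Char) (acc : List PvElem) : List PvElem :=
  if buf ≠ [] then acc ++ [PvElem.s ("\"" ++ String.mk buf ++ "\"")] else acc

def pvFlushVal (buf : List Char) (acc : List PvElem) : List PvElem :=
  if buf ≠ [] then acc ++ [PvElem.i ((PySem.Int.ofChars? buf).getD 0)] else acc

-- B's single state-machine scan over the whole path (buf, in_br, elements)
def pvBScan : List Char → List Char → Bool → List PvElem → List PvElem
  | [], buf, inBr, acc => if inBr then pvFlushVal buf acc else pvFlushKey buf acc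
  | c :: cs, buf, inBr, acc =>
    if inBr then
      if c = ']' then pvBScan cs [] false (pvFlushVal buf acc)
      else pvBScan cs (buf ++ [c]) true acc
    else if c = '[' then pvBScan cs [] true (pvFlushKey buf acc)
    else if c = '.' then pvBScan cs [] false (pvFlushKey buf acc)
    else pvBScan cs (buf ++ [c]) false acc

-- B's recursive `_build`
def pvBuild : List PvElem → String → String
  | [], r => r
  | e :: es, r =>
    if es = [] then r ++ ".get(" ++ pvFmt e ++ ")"
    else
      pvBuild es (match e with
        | PvElem.s q => "((JSONObject) " ++ r ++ ".get(" ++ q ++ "))"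
        | PvElem.i n => "((JSONArray) " ++ r ++ ".get(" ++ PySem.Int.toStr n ++ "))")

def parse_json_path_alt (path : String) (result : String) : String :=
  pvBuild (pvBScan path.toList [] false []) result

-- ===== PRECONDITION & SPEC =====
-- no '.' strictly inside a bracket region (between '[' and its closing ']' or the string end)
def pvNoDotBr : List Char → Bool → Bool
  | [], _ => true
  | c :: cs, true => if c = ']' then pvNoDotBr cs false else (c != '.') && pvNoDotBr cs true
  | c :: cs, false => pvNoDotBr cs (c == '[')

-- the bracket-content substrings of the path (characters after an opening bracket, up to a
-- closing bracket or the end of the string)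
def pvBrToks : List Char → Bool → List Char → List (List Char)
  | [], true, buf => [buf]
  | [], false, _ => []
  | c :: cs, true, buf =>
    if c = ']' then buf :: pvBrToks cs false []
    else pvBrToks cs true (buf ++ [c])
  | c :: cs, false, _ =>
    if c = '[' then pvBrToks cs true [] else pvBrToks cs false []

-- Pre_ excludes malformed paths: those with a nonempty bracket content that int() does not
-- accept (A raises ValueError there), and those with a '.' inside an unclosed bracket region,
-- where A's returned value is an accident of splitting on '.' before scanning brackets and B's
-- scan raises ValueError instead.
def Pre_parse_json_path (path : String) (result : String) : Prop :=
  pvNoDotBr path.toList false = true ∧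
  ∀ v ∈ pvBrToks path.toList false [], v ≠ [] → (PySem.Int.ofChars? v).isSome = true
instance (path : String) (result : String) : Decidable (Pre_parse_json_path path result) := by
  unfold Pre_parse_json_path; infer_instance

def pvWitness_parse_json_path : String × String := ("records.0[2].name[10]", "json_data")

def Spec_parse_json_path (path : String) (result : String) (out : String) : Prop := out = parse_json_path_alt path result
instance (path : String) (result : String) (out : String) : Decidable (Spec_parse_json_path path result out) := by unfold Spec_parse_json_path; infer_instance

-- ===== CLAIM (what is proved, stated in full; the proofs are below) =====
def Claim_equal_parse_json_path : Prop := ∀ (path : String) (result : String), Dom_parse_json_path path result → Pre_parse_json_path path result → Spec_parse_json_path path result (parse_json_path path result)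

-- ===== LEMMAS AND PROOFS =====

-- clean recursive description of path.split(".") on char lists
def pvSplitDot : List Char → List (List Char)
  | [] => [[]]
  | c :: cs =>
    if c = '.' then [] :: pvSplitDot cs
    else
      match pvSplitDot cs with
      | [] => [[c]]
      | h :: t => (c :: h) :: t

theorem pvSplitDot_ne_nil (cs : List Char) : pvSplitDot cs ≠ [] := by
  cases cs with
  | nil => simp [pvSplitDot]
  | cons c cs =>
    simp only [pvSplitDot]
    split
    · simp
    · split <;> simp

theorem pvGo_eq (fuel : Nat) : ∀ (l cur : List Char) (acc : List (List Char)),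
    l.length < fuel →
    PySem.Chars.splitOn.go ['.'] fuel l cur acc =
      acc.reverse ++ (match pvSplitDot l with
        | [] => []
        | h :: t => (cur.reverse ++ h) :: t) := by
  induction fuel with
  | zero => intro l cur acc h; omega
  | succ n ih =>
    intro l cur acc h
    cases l with
    | nil => simp [PySem.Chars.splitOn.go, pvSplitDot]
    | cons c rest =>
      by_cases hc : c = '.'
      · subst hc
        rw [PySem.Chars.splitOn.go]
        simp only [List.isPrefixOf, BEq.rfl, Bool.true_and, List.isPrefixOf_nil_left, if_true,
          List.length_cons, List.drop_succ_cons, List.drop_zero, List.length_nil]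
        rw [ih rest [] (cur.reverse :: acc) (by simpa using Nat.lt_of_succ_lt_succ h)]
        have := pvSplitDot_ne_nil rest
        cases hs : pvSplitDot rest with
        | nil => exact absurd hs this
        | cons h0 t0 => simp [pvSplitDot, hs]
      · rw [PySem.Chars.splitOn.go]
        have hpre : (['.'].isPrefixOf (c :: rest)) = false := by
          simp only [List.isPrefixOf, List.isPrefixOf_nil_left, Bool.and_true, beq_eq_false_iff_ne]
          exact fun h' => hc h'.symm
        simp only [hpre, if_false, Bool.false_eq_true]
        rw [ih rest (c :: cur) acc (by simpa using Nat.lt_of_succ_lt_succ h)]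
        have := pvSplitDot_ne_nil rest
        cases hs : pvSplitDot rest with
        | nil => exact absurd hs this
        | cons h0 t0 => simp [pvSplitDot, hs, hc]

theorem pvSplitOn_eq (l : List Char) : PySem.Chars.splitOn l ['.'] = pvSplitDot l := by
  unfold PySem.Chars.splitOn
  rw [pvGo_eq (l.length + 1) l [] [] (by omega)]
  have := pvSplitDot_ne_nil l
  cases hs : pvSplitDot l with
  | nil => exact absurd hs this
  | cons h t => simp

theorem pvPart1_not_mem (c : Char) (xs : List Char) (h : c ∉ xs) : pvPart1 c xs = (xs, []) := by
  induction xs with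
  | nil => simp [pvPart1]
  | cons x xs ih =>
    simp only [List.mem_cons, not_or] at h
    simp [pvPart1, Ne.symm h.1, ih h.2]

theorem pvPart1_append (c : Char) (pre post : List Char) (h : c ∉ pre) :
    pvPart1 c (pre ++ c :: post) = (pre, post) := by
  induction pre with
  | nil => simp [pvPart1]
  | cons x xs ih =>
    simp only [List.mem_cons, not_or] at h
    simp [pvPart1, Ne.symm h.1, ih h.2]

theorem pvAWhile_nil (acc : List PvElem) : pvAWhile [] acc = acc := by
  rw [pvAWhile]
  simp

-- a segment with no '[' contributes exactly its (possibly empty) key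
theorem pvAWhile_no_bracket (keys : List Char) (acc : List PvElem) (h : '[' ∉ keys) :
    pvAWhile keys acc = pvFlushKey keys acc := by
  rw [pvAWhile]
  by_cases hk : keys = []
  · simp [hk, pvFlushKey]
  · simp only [hk, dif_neg, not_false_iff]
    rw [pvPart1_not_mem '[' keys h]
    simp only [pvPart1]
    rw [pvAWhile]
    simp [hk, pvFlushKey]

-- A's bracket-mode continuation: consume up to ']' then continue the while loop
def pvAWhileV (keys : List Char) (acc : List PvElem) : List PvElem :=
  pvAWhile (pvPart1 ']' keys).2 (pvFlushVal (pvPart1 ']' keys).1 acc)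

theorem pvAWhile_split (buf h0 : List Char) (acc : List PvElem) (hb : '[' ∉ buf) :
    pvAWhile (buf ++ '[' :: h0) acc = pvAWhileV h0 (pvFlushKey buf acc) := by
  rw [pvAWhile]
  have hne : buf ++ '[' :: h0 ≠ [] := by simp
  simp only [hne, dif_neg, not_false_iff]
  rw [pvPart1_append '[' buf h0 hb]
  simp only [pvAWhileV, pvFlushKey, pvFlushVal]

-- the central bridge: on paths with no '.' inside bracket regions, B's scan = fold of A's
-- while loop over the dot-split segments
theorem pvBScan_eq (cs : List Char) : ∀ (buf : List Char) (acc : List PvElem),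
    ('[' ∉ buf → pvNoDotBr cs false = true → pvBScan cs buf false acc =
      (pvSplitDot cs).tail.foldl (fun a s => pvAWhile s a)
        (pvAWhile (buf ++ (pvSplitDot cs).head!) acc)) ∧
    (']' ∉ buf → pvNoDotBr cs true = true → pvBScan cs buf true acc =
      (pvSplitDot cs).tail.foldl (fun a s => pvAWhile s a)
        (pvAWhileV (buf ++ (pvSplitDot cs).head!) acc)) := by
  induction cs with
  | nil =>
    intro buf acc
    constructor
    · intro hb _
      simp [pvBScan, pvSplitDot, pvAWhile_no_bracket buf acc hb]
    · intro hb _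
      simp only [pvBScan, pvSplitDot, List.tail, List.head!, List.foldl, List.append_nil,
        if_true]
      rw [pvAWhileV, pvPart1_not_mem ']' buf hb]
      simp [pvAWhile_nil]
  | cons c cs ih =>
    intro buf acc
    have hK := fun b a => (ih b a).1
    have hT := fun b a => (ih b a).2
    have hsplit := pvSplitDot_ne_nil cs
    obtain ⟨h0, t0, hs⟩ : ∃ h0 t0, pvSplitDot cs = h0 :: t0 := by
      cases hcs : pvSplitDot cs with
      | nil => exact absurd hcs hsplit
      | cons a b => exact ⟨a, b, rfl⟩
    constructor
    · -- key mode
      intro hb hnd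
      by_cases hdot : c = '.'
      · subst hdot
        have hnd' : pvNoDotBr cs false = true := by
          simpa [pvNoDotBr] using hnd
        simp only [pvBScan, if_neg, reduceIte]
        rw [hK [] (pvFlushKey buf acc) (by simp) hnd']
        have : pvSplitDot ('.' :: cs) = [] :: pvSplitDot cs := by simp [pvSplitDot]
        rw [this, hs]
        simp [pvAWhile_no_bracket buf acc hb]
      · by_cases hbr : c = '['
        · subst hbr
          have hnd' : pvNoDotBr cs true = true := by
            simpa [pvNoDotBr] using hnd
          simp only [pvBScan, reduceIte]
          rw [hT [] (pvFlushKey buf acc) (by simp) hnd']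
          have : pvSplitDot ('[' :: cs) = ('[' :: h0) :: t0 := by
            simp [pvSplitDot, hs]
          rw [this, hs]
          simp only [List.tail, List.head!]
          rw [pvAWhile_split buf h0 acc hb]
          simp
        · have hnd' : pvNoDotBr cs false = true := by
            simp only [pvNoDotBr] at hnd
            rwa [show (c == '[') = false from by simp [hbr]] at hnd
          simp only [pvBScan, hbr, hdot, reduceIte, if_neg, Bool.false_eq_true]
          rw [hK (buf ++ [c]) acc (by simp only [List.mem_append, List.mem_singleton, not_or]; exact ⟨hb, fun h' => hbr h'.symm⟩) hnd']
          have : pvSplitDot (c :: cs) = (c :: h0) :: t0 := by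
            simp [pvSplitDot, hdot, hs]
          rw [this, hs]
          simp
    · -- bracket mode
      intro hb hnd
      by_cases hend : c = ']'
      · subst hend
        have hnd' : pvNoDotBr cs false = true := by
          simpa [pvNoDotBr] using hnd
        have hLHS : pvBScan (']' :: cs) buf true acc =
            pvBScan cs [] false (pvFlushVal buf acc) := by
          simp [pvBScan]
        rw [hLHS, hK [] (pvFlushVal buf acc) (by simp) hnd']
        have : pvSplitDot (']' :: cs) = (']' :: h0) :: t0 := by
          simp [pvSplitDot, hs]
        rw [this, hs]
        simp only [List.tail, List.head!, List.nil_append]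
        rw [pvAWhileV, pvPart1_append ']' buf h0 hb]
      · have hnd2 : c ≠ '.' ∧ pvNoDotBr cs true = true := by
          simpa [pvNoDotBr, hend] using hnd
        have hLHS : pvBScan (c :: cs) buf true acc = pvBScan cs (buf ++ [c]) true acc := by
          simp [pvBScan, hend]
        rw [hLHS, hT (buf ++ [c]) acc (by simp only [List.mem_append, List.mem_singleton, not_or]; exact ⟨hb, fun h' => hend h'.symm⟩) hnd2.2]
        have : pvSplitDot (c :: cs) = (c :: h0) :: t0 := by
          simp [pvSplitDot, hnd2.1, hs]
        rw [this, hs]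
        simp

-- B's recursive build = A's dropLast-fold-then-last build
theorem pvBuild_eq (es : List PvElem) (r : String) :
    pvBuild es r =
      (if h : es = [] then r
       else
        (es.dropLast.foldl (fun r item =>
          match item with
          | PvElem.s q => "((JSONObject) " ++ r ++ ".get(" ++ q ++ "))"
          | PvElem.i n => "((JSONArray) " ++ r ++ ".get(" ++ PySem.Int.toStr n ++ "))") r)
          ++ ".get(" ++ pvFmt (es.getLast h) ++ ")") := by
  induction es generalizing r with
  | nil => simp [pvBuild]
  | cons e es ih =>
    cases es with
    | nil => simp [pvBuild]
    | cons f fs =>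
      have hstep : pvBuild (e :: f :: fs) r =
          pvBuild (f :: fs) (match e with
            | PvElem.s q => "((JSONObject) " ++ r ++ ".get(" ++ q ++ "))"
            | PvElem.i n => "((JSONArray) " ++ r ++ ".get(" ++ PySem.Int.toStr n ++ "))") := by
        simp [pvBuild]
      rw [hstep, ih]
      simp [List.getLast_cons, List.foldl_cons]

-- ===== VERDICT (by name: the statement is the Claim_ definition above) =====
theorem parse_json_path_spec : Claim_equal_parse_json_path := by
  intro path result _ hpre
  unfold Spec_parse_json_path parse_json_path parse_json_path_alt
  rw [pvSplitOn_eq]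
  have hne := pvSplitDot_ne_nil path.toList
  obtain ⟨h0, t0, hs⟩ : ∃ h0 t0, pvSplitDot path.toList = h0 :: t0 := by
    cases hcs : pvSplitDot path.toList with
    | nil => exact absurd hcs hne
    | cons a b => exact ⟨a, b, rfl⟩
  have hB := (pvBScan_eq path.toList [] []).1 (by simp) hpre.1
  rw [hs] at hB ⊢
  simp only [List.tail, List.head!, List.nil_append] at hB
  rw [hB]
  rw [pvBuild_eq]
  simp [List.foldl]
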